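-- pv_equiv track=rewrite | github.com/pypi-data/pypi-mirror-384 | packages/ButtonPad/buttonpad-0.4.0.tar.gz/buttonpad-0.4.0/buttonpad/conwaysgameoflife.py | _control_spans
-- ===== SOURCE A (Python) =====
-- def _control_spans(cols: int) -> tuple[list[int], list[int]]:
-- 	"""Return layout info for the 4 control buttons.
--
-- 	We want 4 control buttons across the bottom row to each span roughly the same
-- 	width. Example: if cols == 20 we would like spans like [5,5,5,5]; if cols == 22
-- 	we might get [6,6,5,5].
--
-- 	Returns:
-- 		(spans, starts)
-- 		spans  - list of 4 integers whose sum == cols (width of each control)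
-- 		starts - list of the starting x positions (left edges) for each control
-- 	"""
-- 	base = cols // 4
-- 	rem = cols % 4
-- 	spans = [base + (1 if i < rem else 0) for i in range(4)]
-- 	starts: list[int] = []
-- 	acc = 0
-- 	for s in spans:
-- 		starts.append(acc)
-- 		acc += s
-- 	return spans, starts
-- ===== SOURCE B (Python) =====
-- def _control_spans(cols: int) -> tuple[list[int], list[int]]:
--     base, rem = divmod(cols, 4)
--     edges = [base * i + min(i, rem) for i in range(5)]
--     return [edges[i + 1] - edges[i] for i in range(4)], edges[:4]
-- ===== Notes on version B (the rewrite author's own statement) =====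
-- stated objective: simpler
-- what changed: B computes the five closed-form bucket edges base*i+min(i,rem) directly, then derives spans as consecutive edge differences and starts as the first four edges, eliminating A's spans comprehension and running-accumulator prefix-sum loop.
import Mathlib
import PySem

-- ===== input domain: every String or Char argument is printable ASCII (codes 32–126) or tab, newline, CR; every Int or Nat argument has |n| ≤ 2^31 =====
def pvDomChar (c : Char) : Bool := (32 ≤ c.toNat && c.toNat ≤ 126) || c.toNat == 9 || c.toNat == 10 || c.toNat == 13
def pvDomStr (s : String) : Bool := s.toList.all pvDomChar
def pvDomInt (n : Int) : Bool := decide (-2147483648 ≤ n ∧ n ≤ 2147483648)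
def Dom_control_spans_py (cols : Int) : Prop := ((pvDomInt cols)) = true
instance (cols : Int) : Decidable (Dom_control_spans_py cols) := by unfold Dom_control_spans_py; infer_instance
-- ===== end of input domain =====

-- B computes the five closed-form bucket edges base*i+min(i,rem), taking spans as consecutive edge differences and starts as the first four edges, replacing A's spans comprehension plus prefix-sum accumulator loop (simpler decomposition; same cost).


-- ===== PORT A =====
def control_spans_py (cols : Int) : List Int × List Int :=
  let base := PySem.Int.floordiv cols 4
  let rem := PySem.Int.mod cols 4
  let spans := (PySem.List.pyRange 0 4 1).map (fun i => base + (if i < rem then 1 else 0))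
  -- starts = []; acc = 0; for s in spans: starts.append(acc); acc += s
  let p := spans.foldl (fun (st : List Int × Int) s => (st.1 ++ [st.2], st.2 + s)) ([], 0)
  (spans, p.1)

-- ===== PORT B =====
def control_spans_py_alt (cols : Int) : List Int × List Int :=
  let base := PySem.Int.floordiv cols 4
  let rem := PySem.Int.mod cols 4
  let edges := (PySem.List.pyRange 0 5 1).map (fun i => base * i + min i rem)
  -- edges[i+1] and edges[i] are always in range (0 ≤ i < 4, len edges = 5), so Python never raises; getD 0 is unreachable
  let spans := (PySem.List.pyRange 0 4 1).map
    (fun i => PySem.List.pyGetD edges (i + 1) 0 - PySem.List.pyGetD edges i 0)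
  (spans, PySem.List.slice edges none (some 4))

-- ===== PRECONDITION & SPEC =====
def Spec_control_spans_py (cols : Int) (out : List Int × List Int) : Prop := out = control_spans_py_alt cols
instance (cols : Int) (out : List Int × List Int) : Decidable (Spec_control_spans_py cols out) := by unfold Spec_control_spans_py; infer_instance

-- ===== CLAIM =====
def Claim_equal_control_spans_py : Prop := ∀ (cols : Int), Dom_control_spans_py cols → Spec_control_spans_py cols (control_spans_py cols)

-- ===== LEMMAS AND PROOFS =====
theorem control_spans_eq (cols : Int) : control_spans_py cols = control_spans_py_alt cols := by
  have h4 : (0 : Int) < 4 := by norm_num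
  have hfd : PySem.Int.floordiv cols 4 = cols / 4 := PySem.Int.floordiv_eq_ediv_of_pos h4
  have hmd : PySem.Int.mod cols 4 = cols % 4 := PySem.Int.mod_eq_emod_of_pos h4
  have hR4 : PySem.List.pyRange 0 4 1 = [0, 1, 2, 3] := by decide
  have hR5 : PySem.List.pyRange 0 5 1 = [0, 1, 2, 3, 4] := by decide
  simp only [control_spans_py, control_spans_py_alt, hfd, hmd, hR4, hR5, List.map, List.foldl,
    PySem.List.pyGetD, PySem.List.pyGet?, PySem.List.pyIdx?, PySem.List.slice, Prod.mk.injEq]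
  norm_num [List.getElem?_cons, List.take, Int.toNat]
  and_intros <;> (try split_ifs) <;> omega

-- ===== VERDICT =====
theorem control_spans_py_spec : Claim_equal_control_spans_py := by
  intro cols _
  unfold Spec_control_spans_py
  exact control_spans_eq cols
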